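-- pv_equiv track=rewrite | github.com/bernardthered/advent_of_code | 2024/day22/monkey_market.py | cache_sequences_of_changes
-- ===== SOURCE A (Python) =====
-- import collections
--
-- def mix(number1, number2):
--     return number1 ^ number2
--
-- def prune(number):
--     return number % 16777216
--
-- def calculate_next_secret(secret):
--     secret = prune(mix(secret, secret * 64))
--     secret = prune(mix(secret, int(secret / 32)))
--     secret = prune(mix(secret, secret * 2048))
--     return secret
--
-- def cache_sequences_of_changes(secret, depth=2000):
--     cache = collections.OrderedDict()
--     last_four_changes = collections.deque()
--     previous_price = secret % 10
--     for i in range(depth - 1):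
--         next_secret = calculate_next_secret(secret)
--         price = next_secret % 10
--         change = price - previous_price
--         last_four_changes.append(change)
--         if len(last_four_changes) > 4:
--             last_four_changes.popleft()
--         if len(last_four_changes) == 4:
--             if tuple(last_four_changes) not in cache:
--                 # only the first occurence of each sequence counts
--                 cache[tuple(last_four_changes)] = price
--         secret = next_secret
--         previous_price = price
--     return cache
-- ===== SOURCE B (Python) =====
-- import collections
--
-- def mix(number1, number2):
--     return number1 ^ number2
--
-- def prune(number):
--     return number % 16777216
--
-- def calculate_next_secret(secret):
--     secret = prune(mix(secret, secret * 64))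
--     secret = prune(mix(secret, int(secret / 32)))
--     secret = prune(mix(secret, secret * 2048))
--     return secret
--
-- def cache_sequences_of_changes(secret, depth=2000):
--     # Build the full price series first, then its change series, then
--     # slide a width-4 window and keep the first price seen per window.
--     prices = [secret % 10]
--     for _ in range(depth - 1):
--         secret = calculate_next_secret(secret)
--         prices.append(secret % 10)
--     changes = [b - a for a, b in zip(prices, prices[1:])]
--     cache = collections.OrderedDict()
--     windows = zip(changes, changes[1:], changes[2:], changes[3:])
--     for window, price in zip(windows, prices[4:]):
--         cache.setdefault(window, price)
--     return cache
-- ===== Notes on version B (the rewrite author's own statement) =====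
-- stated objective: alternative
-- what changed: Replaces A's single stateful loop (deque of last four changes, membership test, previous-price tracking) by a pipeline: build the whole price list, derive the change list as consecutive differences, then zip width-4 windows with the aligned prices and setdefault each pair.
import Mathlib
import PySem

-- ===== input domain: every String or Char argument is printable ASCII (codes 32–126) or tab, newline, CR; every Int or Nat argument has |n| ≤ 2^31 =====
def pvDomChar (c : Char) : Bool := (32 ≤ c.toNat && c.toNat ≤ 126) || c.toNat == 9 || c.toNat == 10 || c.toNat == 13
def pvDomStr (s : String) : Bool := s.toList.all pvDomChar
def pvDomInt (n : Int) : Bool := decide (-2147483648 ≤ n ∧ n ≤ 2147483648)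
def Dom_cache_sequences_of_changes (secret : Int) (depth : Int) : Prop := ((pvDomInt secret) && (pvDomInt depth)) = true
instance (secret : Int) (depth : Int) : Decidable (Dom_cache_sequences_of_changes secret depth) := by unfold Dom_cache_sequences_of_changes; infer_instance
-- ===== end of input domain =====

-- B re-decomposes A's single stateful loop into a pipeline (price list, change list,
-- zipped width-4 windows folded with setdefault); same cost, alternative structure.

-- ===== PORT A =====
def csoc_mix (number1 : Int) (number2 : Int) : Int := PySem.Int.bxor number1 number2

def csoc_prune (number : Int) : Int := PySem.Int.mod number 16777216

def csoc_next (secret : Int) : Int :=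
  let s1 := csoc_prune (csoc_mix secret (secret * 64))
  -- int(s1 / 32): truncating float division; exact here since 0 ≤ s1 < 2^24 < 2^53
  let s2 := csoc_prune (csoc_mix s1 (PySem.Int.truncdiv s1 32))
  csoc_prune (csoc_mix s2 (s2 * 2048))

-- one iteration of A's for-loop: state = (cache, last_four_changes, previous_price, secret)
def csoc_stepA (st : PySem.Dict (List Int) Int × List Int × Int × Int) :
    PySem.Dict (List Int) Int × List Int × Int × Int :=
  let cache := st.1
  let ns := csoc_next st.2.2.2
  let price := PySem.Int.mod ns 10
  let change := price - st.2.2.1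
  let lf := st.2.1 ++ [change]
  let lf := if lf.length > 4 then lf.tail else lf
  let cache := if lf.length = 4 then
      (if cache.contains lf then cache else cache.insert lf price)
    else cache
  (cache, lf, price, ns)

def cache_sequences_of_changes (secret : Int) (depth : Int) : List (List Int × Int) :=
  ((List.range (depth - 1).toNat).foldl (fun st _ => csoc_stepA st)
    (PySem.Dict.empty, ([] : List Int), PySem.Int.mod secret 10, secret)).1.items

-- ===== PORT B =====
-- one iteration of B's price-building loop: state = (prices, secret)
def csoc_stepP (st : List Int × Int) : List Int × Int :=
  let ns := csoc_next st.2
  (st.1 ++ [PySem.Int.mod ns 10], ns)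

def cache_sequences_of_changes_alt (secret : Int) (depth : Int) : List (List Int × Int) :=
  let prices := ((List.range (depth - 1).toNat).foldl (fun st _ => csoc_stepP st)
    ([PySem.Int.mod secret 10], secret)).1
  let changes := List.zipWith (fun a b => b - a) prices prices.tail
  let windows := List.zipWith (fun a bcd => a :: bcd) changes
      (List.zipWith (fun b cd => b :: cd) changes.tail
        (List.zipWith (fun c d => [c, d]) changes.tail.tail changes.tail.tail.tail))
  ((windows.zip (prices.drop 4)).foldl
      (fun cache wp => cache.setdefault wp.1 wp.2) PySem.Dict.empty).items

-- ===== PRECONDITION & SPEC =====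
def Spec_cache_sequences_of_changes (secret : Int) (depth : Int) (out : List (List Int × Int)) : Prop := out = cache_sequences_of_changes_alt secret depth
instance (secret : Int) (depth : Int) (out : List (List Int × Int)) : Decidable (Spec_cache_sequences_of_changes secret depth out) := by unfold Spec_cache_sequences_of_changes; infer_instance

-- ===== CLAIM (what is proved, stated in full; the proofs are below) =====
def Claim_equal_cache_sequences_of_changes : Prop := ∀ (secret : Int) (depth : Int), Dom_cache_sequences_of_changes secret depth → Spec_cache_sequences_of_changes secret depth (cache_sequences_of_changes secret depth)

-- ===== LEMMAS AND PROOFS =====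

def pvSecN (secret : Int) : Nat → Int
  | 0 => secret
  | k + 1 => csoc_next (pvSecN secret k)
def pvPN (secret : Int) (k : Nat) : Int := PySem.Int.mod (pvSecN secret k) 10
def pvCN (secret : Int) (k : Nat) : Int := pvPN secret (k + 1) - pvPN secret k
def pvPricesN (secret : Int) (n : Nat) : List Int := (List.range (n + 1)).map (pvPN secret)

lemma pvB_prices (secret : Int) (n : Nat) :
    (List.range n).foldl (fun st _ => csoc_stepP st) ([PySem.Int.mod secret 10], secret)
    = (pvPricesN secret n, pvSecN secret n) := by
  induction n with
  | zero => simp [pvPricesN, pvSecN, pvPN]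
  | succ n ih =>
      rw [List.range_succ, List.foldl_append, ih]
      simp [csoc_stepP, pvPricesN, List.range_succ, pvSecN, pvPN]

lemma pvChanges_eq (secret : Int) (n : Nat) :
    List.zipWith (fun a b => b - a) (pvPricesN secret n) (pvPricesN secret n).tail
    = (List.range n).map (pvCN secret) := by
  apply List.ext_getElem
  · simp [pvPricesN]
  · intro i h1 h2
    simp [pvPricesN, pvCN, List.getElem_tail]

lemma drop_map_range_three (f : Nat → Int) (n : Nat) (h : 3 ≤ n) :
    ((List.range n).map f).drop (n - 3) = [f (n-3), f (n-3+1), f (n-3+2)] := by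
  apply List.ext_getElem
  · simp; omega
  · intro i h1 h2
    simp only [List.getElem_drop, List.getElem_map, List.getElem_range]
    simp at h2
    interval_cases i <;> simp

def pvPairsN (secret : Int) (n : Nat) : List (List Int × Int) :=
  (List.range (n - 3)).map (fun j =>
    ([pvCN secret j, pvCN secret (j+1), pvCN secret (j+2), pvCN secret (j+3)], pvPN secret (j+4)))

lemma pvB_pairs (secret : Int) (n : Nat) :
    (List.zipWith (fun a bcd => a :: bcd) (List.zipWith (fun a b => b - a) (pvPricesN secret n) (pvPricesN secret n).tail)
      (List.zipWith (fun b cd => b :: cd) (List.zipWith (fun a b => b - a) (pvPricesN secret n) (pvPricesN secret n).tail).tail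
        (List.zipWith (fun c d => [c, d]) (List.zipWith (fun a b => b - a) (pvPricesN secret n) (pvPricesN secret n).tail).tail.tail
          (List.zipWith (fun a b => b - a) (pvPricesN secret n) (pvPricesN secret n).tail).tail.tail.tail))).zip
      ((pvPricesN secret n).drop 4)
    = pvPairsN secret n := by
  rw [pvChanges_eq]
  apply List.ext_getElem
  · simp [pvPairsN, pvPricesN]; omega
  · intro i h1 h2
    simp only [List.getElem_zip, List.getElem_zipWith, List.getElem_tail, List.getElem_drop,
      List.getElem_map, List.getElem_range, pvPairsN, pvPricesN]
    have e1 : i+1+1 = i+2 := by omega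
    have e2 : i+1+1+1 = i+3 := by omega
    have e3 : 4+i = i+4 := by omega
    rw [e1, e2, e3]

def pvLfN (secret : Int) (n : Nat) : List Int := (((List.range n).map (pvCN secret)).drop (n - 4))

def pvCacheN (secret : Int) (n : Nat) : PySem.Dict (List Int) Int :=
  (pvPairsN secret n).foldl (fun cache wp => cache.setdefault wp.1 wp.2) PySem.Dict.empty

lemma pvCache_step (secret : Int) (n : Nat) (h3 : 3 ≤ n) :
    pvCacheN secret (n+1)
    = (pvCacheN secret n).setdefault
        [pvCN secret (n-3), pvCN secret (n-3+1), pvCN secret (n-3+2), pvCN secret n]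
        (pvPN secret (n+1)) := by
  have e : (n+1) - 3 = (n-3) + 1 := by omega
  have e2 : n - 3 + 3 = n := by omega
  have e3 : n - 3 + 4 = n + 1 := by omega
  unfold pvCacheN pvPairsN
  rw [e, List.range_succ, List.map_append, List.foldl_append]
  simp only [List.map_cons, List.map_nil, List.foldl_cons, List.foldl_nil]
  rw [e2, e3]

lemma pvSetdefault_if {d : PySem.Dict (List Int) Int} {k : List Int} {v : Int} :
    (if d.contains k then d else d.insert k v) = d.setdefault k v := by
  by_cases h : d.contains k
  · rw [PySem.Dict.setdefault_of_contains d v h, if_pos h]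
  · rw [PySem.Dict.setdefault_of_not_contains d v (by simpa using h), if_neg h]

lemma pvA_step (secret : Int) (n : Nat) :
    csoc_stepA (pvCacheN secret n, pvLfN secret n, pvPN secret n, pvSecN secret n)
    = (pvCacheN secret (n+1), pvLfN secret (n+1), pvPN secret (n+1), pvSecN secret (n+1)) := by
  have hsec : csoc_next (pvSecN secret n) = pvSecN secret (n+1) := rfl
  have hpn : PySem.Int.mod (pvSecN secret (n+1)) 10 = pvPN secret (n+1) := rfl
  have hcn : pvPN secret (n+1) - pvPN secret n = pvCN secret n := rfl
  have hL4 : (pvLfN secret n ++ [pvCN secret n]).length = (n - (n-4)) + 1 := by simp [pvLfN]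
  simp only [csoc_stepA, hsec, hpn, hcn]
  by_cases h4 : 4 ≤ n
  · -- deque overflows: popleft, then the full window is cached
    have h3 : 3 ≤ n := by omega
    have htail : (pvLfN secret n ++ [pvCN secret n]).tail
        = ((List.range n).map (pvCN secret)).drop (n-3) ++ [pvCN secret n] := by
      have hne : (((List.range n).map (pvCN secret)).drop (n-4)) ≠ [] := by
        apply List.ne_nil_of_length_pos; simp; omega
      rw [pvLfN, List.tail_append_of_ne_nil hne, List.tail_drop]
      congr 2
      omega
    have hlf1 : (pvLfN secret n ++ [pvCN secret n]).tail = pvLfN secret (n+1) := by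
      have e : n + 1 - 4 = n - 3 := by omega
      rw [htail, pvLfN, List.range_succ, List.map_append,
        List.drop_append_of_le_length (by simp), e]
      rfl
    have hwin : (pvLfN secret n ++ [pvCN secret n]).tail
        = [pvCN secret (n-3), pvCN secret (n-3+1), pvCN secret (n-3+2), pvCN secret n] := by
      rw [htail, drop_map_range_three _ _ h3]
      rfl
    rw [if_pos (by omega : (pvLfN secret n ++ [pvCN secret n]).length > 4)]
    rw [hwin,
      if_pos (by simp : ([pvCN secret (n-3), pvCN secret (n-3+1), pvCN secret (n-3+2),
        pvCN secret n] : List Int).length = 4),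
      pvSetdefault_if, ← pvCache_step secret n h3, ← hwin, hlf1]
  · rw [if_neg (by omega : ¬ (pvLfN secret n ++ [pvCN secret n]).length > 4)]
    have hlf1 : pvLfN secret n ++ [pvCN secret n] = pvLfN secret (n+1) := by
      rw [pvLfN, pvLfN, List.range_succ, List.map_append]
      have : n - 4 = 0 := by omega
      have : (n+1) - 4 = 0 := by omega
      simp_all
    rw [hlf1]
    by_cases h3 : n = 3
    · subst h3
      have hlfval : pvLfN secret (3+1) = [pvCN secret 0, pvCN secret 1, pvCN secret 2, pvCN secret 3] := rfl
      have hc4 : pvCacheN secret (3+1)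
          = (pvCacheN secret 3).setdefault [pvCN secret 0, pvCN secret 1, pvCN secret 2, pvCN secret 3]
              (pvPN secret (3+1)) := rfl
      rw [hlfval,
        if_pos (by simp : ([pvCN secret 0, pvCN secret 1, pvCN secret 2, pvCN secret 3] : List Int).length = 4),
        pvSetdefault_if, ← hc4]
    · rw [if_neg (by simp only [pvLfN, List.length_drop, List.length_map, List.length_range]; omega)]
      have : pvCacheN secret (n+1) = pvCacheN secret n := by
        have e : (n+1) - 3 = n - 3 := by omega
        unfold pvCacheN pvPairsN
        rw [e]
      rw [this]

lemma pvA_loop (secret : Int) (n : Nat) :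
    (List.range n).foldl (fun st _ => csoc_stepA st)
      (PySem.Dict.empty, ([] : List Int), PySem.Int.mod secret 10, secret)
    = (pvCacheN secret n, pvLfN secret n, pvPN secret n, pvSecN secret n) := by
  induction n with
  | zero => simp [pvCacheN, pvPairsN, pvLfN, pvPN, pvSecN]
  | succ n ih => rw [List.range_succ, List.foldl_append, ih]; simp [pvA_step]

-- ===== VERDICT (by name: the statement is the Claim_ definition above) =====
theorem cache_sequences_of_changes_spec : Claim_equal_cache_sequences_of_changes := by
  intro secret depth _
  unfold Spec_cache_sequences_of_changes cache_sequences_of_changes cache_sequences_of_changes_alt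
  rw [pvA_loop, pvB_prices]
  simp only [pvB_pairs]
  rfl
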